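-- pv_equiv track=rewrite | github.com/sowwnn/comam_r2g | modules/tokenizers_enhanced.py | sort_vocabulary_by_semantics
-- ===== SOURCE A (Python) =====
-- def sort_vocabulary_by_semantics(vocab):
--     """Sắp xếp từ vựng theo nhóm ngữ nghĩa thay vì theo bảng chữ cái"""
--     # Chia thành các nhóm
--     organ_terms = []
--     normal_terms = []
--     abnormal_terms = []
--     descriptor_terms = []
--     negation_terms = []
--     other_terms = []
--
--     # Phân loại từng từ
--     for token in vocab:
--         token_lower = token.lower()
--
--         # Các bộ phận cơ thể
--         if token_lower in ['heart', 'cardiac', 'cardiomediastinal', 'lung', 'lungs', 'pulmonary',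
--                          'mediastinum', 'pleural', 'bony', 'osseous', 'spine', 'thorax', 'thoracic',
--                          'rib', 'diaphragm', 'vasculature', 'silhouette', 'contour', 'contours']:
--             organ_terms.append(token)
--
--         # Từ mô tả bình thường
--         elif token_lower in ['normal', 'unremarkable', 'clear', 'stable', 'unchanged', 'intact',
--                            'within', 'limits', 'free', 'negative', 'expanded', 'aerated', 'well-aerated',
--                            'well', 'grossly']:
--             normal_terms.append(token)
--
--         # Từ mô tả bất thường
--         elif token_lower in ['consolidation', 'opacity', 'opacities', 'effusion', 'pneumothorax',
--                            'infiltrate', 'infiltration', 'edema', 'mass', 'nodule', 'atelectasis',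
--                            'abnormality', 'abnormal', 'fracture', 'pneumonia']:
--             abnormal_terms.append(token)
--
--         # Từ mô tả mức độ
--         elif token_lower in ['mild', 'moderate', 'severe', 'small', 'large', 'focal', 'diffuse',
--                           'minimal', 'significant', 'acute', 'chronic']:
--             descriptor_terms.append(token)
--
--         # Từ phủ định
--         elif token_lower in ['no', 'not', 'without', 'none', 'absence', 'negative']:
--             negation_terms.append(token)
--
--         # Các từ khác
--         else:
--             other_terms.append(token)
--
--     # Sắp xếp từng nhóm riêng
--     for group in [organ_terms, normal_terms, abnormal_terms, descriptor_terms, negation_terms]: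
--         group.sort()
--
--     other_terms.sort()
--
--     # Kết hợp các nhóm theo thứ tự ưu tiên
--     sorted_vocab = (organ_terms + normal_terms + abnormal_terms +
--                    descriptor_terms + negation_terms + other_terms)
--
--     return sorted_vocab
-- ===== SOURCE B (Python) =====
-- _CATEGORIES = [
--     {'heart', 'cardiac', 'cardiomediastinal', 'lung', 'lungs', 'pulmonary',
--      'mediastinum', 'pleural', 'bony', 'osseous', 'spine', 'thorax', 'thoracic',
--      'rib', 'diaphragm', 'vasculature', 'silhouette', 'contour', 'contours'},
--     {'normal', 'unremarkable', 'clear', 'stable', 'unchanged', 'intact',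
--      'within', 'limits', 'free', 'negative', 'expanded', 'aerated', 'well-aerated',
--      'well', 'grossly'},
--     {'consolidation', 'opacity', 'opacities', 'effusion', 'pneumothorax',
--      'infiltrate', 'infiltration', 'edema', 'mass', 'nodule', 'atelectasis',
--      'abnormality', 'abnormal', 'fracture', 'pneumonia'},
--     {'mild', 'moderate', 'severe', 'small', 'large', 'focal', 'diffuse',
--      'minimal', 'significant', 'acute', 'chronic'},
--     {'no', 'not', 'without', 'none', 'absence', 'negative'},
-- ]
--
--
-- def _rank(token_lower):
--     for i, category in enumerate(_CATEGORIES):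
--         if token_lower in category:
--             return i
--     return len(_CATEGORIES)
--
--
-- def sort_vocabulary_by_semantics(vocab):
--     """Sắp xếp từ vựng theo nhóm ngữ nghĩa thay vì theo bảng chữ cái"""
--     return sorted(vocab, key=lambda t: (_rank(t.lower()), t))
-- ===== Notes on version B (the rewrite author's own statement) =====
-- stated objective: simpler
-- what changed: Replaces A's six explicit buckets, six per-bucket sorts and ordered concatenation with a single global sort on a composite key (category rank checked in A's elif priority order, then the token itself).
import Mathlib
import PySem

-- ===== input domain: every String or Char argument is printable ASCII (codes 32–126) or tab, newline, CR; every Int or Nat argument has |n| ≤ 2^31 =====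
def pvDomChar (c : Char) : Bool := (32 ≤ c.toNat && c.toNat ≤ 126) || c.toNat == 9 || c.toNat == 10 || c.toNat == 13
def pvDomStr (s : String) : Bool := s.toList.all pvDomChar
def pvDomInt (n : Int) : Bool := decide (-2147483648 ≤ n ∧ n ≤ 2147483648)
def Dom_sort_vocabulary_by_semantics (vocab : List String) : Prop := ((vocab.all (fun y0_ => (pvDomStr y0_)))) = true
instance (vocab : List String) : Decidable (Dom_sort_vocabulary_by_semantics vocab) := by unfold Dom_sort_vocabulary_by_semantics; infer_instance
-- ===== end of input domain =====

-- B replaces A's six explicit buckets, per-bucket sorts and concatenation by ONE global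
-- sort on the composite key (category rank in A's elif priority order, then the token):
-- objective: simpler.

-- The five category word lists, in A's elif priority order (shared vocabulary constants).
def pvORG : List String := ["heart", "cardiac", "cardiomediastinal", "lung", "lungs", "pulmonary",
  "mediastinum", "pleural", "bony", "osseous", "spine", "thorax", "thoracic",
  "rib", "diaphragm", "vasculature", "silhouette", "contour", "contours"]
def pvNORM : List String := ["normal", "unremarkable", "clear", "stable", "unchanged", "intact",
  "within", "limits", "free", "negative", "expanded", "aerated", "well-aerated",
  "well", "grossly"]
def pvABN : List String := ["consolidation", "opacity", "opacities", "effusion", "pneumothorax",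
  "infiltrate", "infiltration", "edema", "mass", "nodule", "atelectasis",
  "abnormality", "abnormal", "fracture", "pneumonia"]
def pvDESC : List String := ["mild", "moderate", "severe", "small", "large", "focal", "diffuse",
  "minimal", "significant", "acute", "chronic"]
def pvNEG : List String := ["no", "not", "without", "none", "absence", "negative"]

-- ===== PORT A =====
-- A's single classification loop, carried as a 6-tuple of buckets
-- (organ, normal, abnormal, descriptor, negation, other).
def pvClassStep (acc : List String × List String × List String × List String × List String × List String)
    (token : String) :
    List String × List String × List String × List String × List String × List String :=
  let tl := PySem.Str.lower token
  if tl ∈ pvORG then (acc.1 ++ [token], acc.2.1, acc.2.2.1, acc.2.2.2.1, acc.2.2.2.2.1, acc.2.2.2.2.2)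
  else if tl ∈ pvNORM then (acc.1, acc.2.1 ++ [token], acc.2.2.1, acc.2.2.2.1, acc.2.2.2.2.1, acc.2.2.2.2.2)
  else if tl ∈ pvABN then (acc.1, acc.2.1, acc.2.2.1 ++ [token], acc.2.2.2.1, acc.2.2.2.2.1, acc.2.2.2.2.2)
  else if tl ∈ pvDESC then (acc.1, acc.2.1, acc.2.2.1, acc.2.2.2.1 ++ [token], acc.2.2.2.2.1, acc.2.2.2.2.2)
  else if tl ∈ pvNEG then (acc.1, acc.2.1, acc.2.2.1, acc.2.2.2.1, acc.2.2.2.2.1 ++ [token], acc.2.2.2.2.2)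
  else (acc.1, acc.2.1, acc.2.2.1, acc.2.2.2.1, acc.2.2.2.2.1, acc.2.2.2.2.2 ++ [token])

def sort_vocabulary_by_semantics (vocab : List String) : List String :=
  let s := vocab.foldl pvClassStep ([], [], [], [], [], [])
  -- for group in [...]: group.sort();  other_terms.sort()
  let organ := PySem.List.sorted s.1 (fun x => x)
  let normal := PySem.List.sorted s.2.1 (fun x => x)
  let abnormal := PySem.List.sorted s.2.2.1 (fun x => x)
  let descriptor := PySem.List.sorted s.2.2.2.1 (fun x => x)
  let negation := PySem.List.sorted s.2.2.2.2.1 (fun x => x)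
  let other := PySem.List.sorted s.2.2.2.2.2 (fun x => x)
  organ ++ normal ++ abnormal ++ descriptor ++ negation ++ other

-- ===== PORT B =====
-- _CATEGORIES, in priority order
def pvCATS : List (List String) := [pvORG, pvNORM, pvABN, pvDESC, pvNEG]

-- _rank's 'for i, category in enumerate(_CATEGORIES): if token_lower in category: return i; return len'
def pvRankGo (tl : String) : List (List String) → Nat → Nat
  | [], i => i
  | c :: rest, i => if tl ∈ c then i else pvRankGo tl rest (i + 1)

def pvRank (tl : String) : Nat := pvRankGo tl pvCATS 0

def sort_vocabulary_by_semantics_alt (vocab : List String) : List String :=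
  PySem.List.sorted2 vocab (fun t => pvRank (PySem.Str.lower t)) (fun t => t)

-- ===== PRECONDITION & SPEC =====
def Spec_sort_vocabulary_by_semantics (vocab : List String) (out : List String) : Prop := out = sort_vocabulary_by_semantics_alt vocab
instance (vocab : List String) (out : List String) : Decidable (Spec_sort_vocabulary_by_semantics vocab out) := by unfold Spec_sort_vocabulary_by_semantics; infer_instance

-- ===== CLAIM (what is proved, stated in full; the proofs are below) =====
def Claim_equal_sort_vocabulary_by_semantics : Prop := ∀ (vocab : List String), Dom_sort_vocabulary_by_semantics vocab → Spec_sort_vocabulary_by_semantics vocab (sort_vocabulary_by_semantics vocab)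

-- ===== LEMMAS AND PROOFS =====

-- rank of a token (computed on its lower-cased form), and the composite lexicographic key
def pvRk (t : String) : Nat := pvRank (PySem.Str.lower t)
def pvKey (t : String) : Lex (Nat × String) := toLex (pvRk t, t)

theorem pvRk_eq (t : String) :
    pvRk t = (if PySem.Str.lower t ∈ pvORG then 0 else if PySem.Str.lower t ∈ pvNORM then 1
      else if PySem.Str.lower t ∈ pvABN then 2 else if PySem.Str.lower t ∈ pvDESC then 3
      else if PySem.Str.lower t ∈ pvNEG then 4 else 5) := by
  simp [pvRk, pvRank, pvCATS, pvRankGo]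

theorem pvRk_le (t : String) : pvRk t ≤ 5 := by
  rw [pvRk_eq]; split_ifs <;> omega

theorem pvKey_inj : Function.Injective pvKey := by
  intro a b h
  simpa using congrArg (fun p => (ofLex p).2) h

-- the classification fold computes the six rank-filters
def pvFlt (l : List String) (i : Nat) : List String := l.filter (fun t => pvRk t == i)

theorem pvFold_eq (l : List String)
    (a0 a1 a2 a3 a4 a5 : List String) :
    l.foldl pvClassStep (a0, a1, a2, a3, a4, a5) =
      (a0 ++ pvFlt l 0, a1 ++ pvFlt l 1, a2 ++ pvFlt l 2,
       a3 ++ pvFlt l 3, a4 ++ pvFlt l 4, a5 ++ pvFlt l 5) := by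
  induction l generalizing a0 a1 a2 a3 a4 a5 with
  | nil => simp [pvFlt]
  | cons x xs ih =>
    have hx := pvRk_eq x
    simp only [List.foldl_cons, pvClassStep]
    split_ifs at hx ⊢ <;>
      simp_all [pvFlt, List.append_assoc]

-- count of x in a filtered list
theorem pvCount_filter (x : String) (p : String → Bool) (l : List String) :
    (l.filter p).count x = if p x then l.count x else 0 := by
  by_cases h : p x
  · simp [h, List.count_filter h]
  · simp [h, List.count_eq_zero.mpr (fun hm => h (List.of_mem_filter hm))]

-- the six rank-filters concatenated are a permutation of the list
theorem pvFlt_perm (l : List String) :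
    (pvFlt l 0 ++ pvFlt l 1 ++ pvFlt l 2 ++ pvFlt l 3 ++ pvFlt l 4 ++ pvFlt l 5).Perm l := by
  rw [List.perm_iff_count]
  intro a
  have h5 := pvRk_le a
  simp only [pvFlt, List.count_append, pvCount_filter]
  interval_cases h : pvRk a <;> simp

-- sorted block i
def pvBlk (l : List String) (i : Nat) : List String :=
  PySem.List.sorted (pvFlt l i) (fun x => x)

theorem pvBlk_rk {l : List String} {i : Nat} {x : String} (hx : x ∈ pvBlk l i) : pvRk x = i := by
  have := (PySem.List.sorted_perm (pvFlt l i) (fun x => x) false).mem_iff.mp hx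
  simpa [pvFlt] using (List.mem_filter.mp this).2

theorem pvBlk_pw (l : List String) (i : Nat) :
    List.Pairwise (fun a b => pvKey a ≤ pvKey b) (pvBlk l i) := by
  have h := PySem.List.sorted_pairwise (pvFlt l i) (fun x : String => x)
  refine (List.pairwise_iff_forall_sublist.mpr ?_)
  intro a b hs
  have hab : a ≤ b := List.pairwise_iff_forall_sublist.mp h hs
  have ha : pvRk a = i := pvBlk_rk (hs.subset (by simp))
  have hb : pvRk b = i := pvBlk_rk (hs.subset (by simp))
  show toLex (pvRk a, a) ≤ toLex (pvRk b, b)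
  rw [Prod.Lex.le_iff, ha, hb]
  exact Or.inr ⟨rfl, hab⟩

theorem pvCross {a b : String} (h : pvRk a < pvRk b) : pvKey a ≤ pvKey b := by
  show toLex (pvRk a, a) ≤ toLex (pvRk b, b)
  rw [Prod.Lex.le_iff]
  exact Or.inl h

-- pairwise key-order on the whole (left-associated) concatenation of blocks
theorem pvConcat_pw (l : List String) :
    List.Pairwise (fun a b => pvKey a ≤ pvKey b)
      (pvBlk l 0 ++ pvBlk l 1 ++ pvBlk l 2 ++ pvBlk l 3 ++ pvBlk l 4 ++ pvBlk l 5) := by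
  have m1 : ∀ x ∈ pvBlk l 0 ++ pvBlk l 1, pvRk x ≤ 1 := by
    intro x hx; rcases List.mem_append.mp hx with h | h <;> simp [pvBlk_rk h]
  have m2 : ∀ x ∈ pvBlk l 0 ++ pvBlk l 1 ++ pvBlk l 2, pvRk x ≤ 2 := by
    intro x hx; rcases List.mem_append.mp hx with h | h
    · exact le_trans (m1 x h) (by omega)
    · simp [pvBlk_rk h]
  have m3 : ∀ x ∈ pvBlk l 0 ++ pvBlk l 1 ++ pvBlk l 2 ++ pvBlk l 3, pvRk x ≤ 3 := by
    intro x hx; rcases List.mem_append.mp hx with h | h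
    · exact le_trans (m2 x h) (by omega)
    · simp [pvBlk_rk h]
  have m4 : ∀ x ∈ pvBlk l 0 ++ pvBlk l 1 ++ pvBlk l 2 ++ pvBlk l 3 ++ pvBlk l 4, pvRk x ≤ 4 := by
    intro x hx; rcases List.mem_append.mp hx with h | h
    · exact le_trans (m3 x h) (by omega)
    · simp [pvBlk_rk h]
  have pw1 : List.Pairwise (fun a b => pvKey a ≤ pvKey b) (pvBlk l 0 ++ pvBlk l 1) :=
    List.pairwise_append.mpr ⟨pvBlk_pw l 0, pvBlk_pw l 1,
      fun a ha b hb => pvCross (by rw [pvBlk_rk ha, pvBlk_rk hb]; omega)⟩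
  have pw2 := List.pairwise_append.mpr ⟨pw1, pvBlk_pw l 2,
    fun a ha b hb => pvCross (by have := m1 a ha; rw [pvBlk_rk hb]; omega)⟩
  have pw3 := List.pairwise_append.mpr ⟨pw2, pvBlk_pw l 3,
    fun a ha b hb => pvCross (by have := m2 a ha; rw [pvBlk_rk hb]; omega)⟩
  have pw4 := List.pairwise_append.mpr ⟨pw3, pvBlk_pw l 4,
    fun a ha b hb => pvCross (by have := m3 a ha; rw [pvBlk_rk hb]; omega)⟩
  exact List.pairwise_append.mpr ⟨pw4, pvBlk_pw l 5,
    fun a ha b hb => pvCross (by have := m4 a ha; rw [pvBlk_rk hb]; omega)⟩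

-- B's sorted2 is a sort by the lexicographic composite key
theorem pvBefore_eq (a b : String) :
    (decide (pvRank (PySem.Str.lower a) < pvRank (PySem.Str.lower b)) ||
      (!decide (pvRank (PySem.Str.lower b) < pvRank (PySem.Str.lower a)) && decide (a < b)))
      = decide (pvKey a < pvKey b) := by
  show (decide (pvRk a < pvRk b) || (!decide (pvRk b < pvRk a) && decide (a < b)))
      = decide (toLex (pvRk a, a) < toLex (pvRk b, b))
  rcases Nat.lt_trichotomy (pvRk a) (pvRk b) with h | h | h
  · simp [h, Prod.Lex.lt_iff]
  · simp [h, Prod.Lex.lt_iff]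
  · simp [Prod.Lex.lt_iff, h, Nat.lt_asymm h, (Nat.ne_of_lt h).symm]

theorem pvSorted2_eq (vocab : List String) :
    sort_vocabulary_by_semantics_alt vocab = PySem.List.sorted vocab pvKey := by
  unfold sort_vocabulary_by_semantics_alt
  rw [PySem.List.sorted_eq_foldl_insertBy]
  simp only [PySem.List.sorted2, if_neg (by decide : ¬ (false = true))]
  congr 1
  funext acc x
  congr 1
  funext a b
  exact pvBefore_eq a b

-- ===== VERDICT (by name: the statement is the Claim_ definition above) =====
theorem sort_vocabulary_by_semantics_spec : Claim_equal_sort_vocabulary_by_semantics := by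
  intro vocab _
  unfold Spec_sort_vocabulary_by_semantics
  rw [pvSorted2_eq]
  show sort_vocabulary_by_semantics vocab = _
  unfold sort_vocabulary_by_semantics
  rw [pvFold_eq]
  simp only [List.nil_append]
  have hC : (pvBlk vocab 0 ++ pvBlk vocab 1 ++ pvBlk vocab 2 ++ pvBlk vocab 3 ++
      pvBlk vocab 4 ++ pvBlk vocab 5).Perm (PySem.List.sorted vocab pvKey) := by
    refine List.Perm.trans ?_ (PySem.List.sorted_perm vocab pvKey false).symm
    refine List.Perm.trans ?_ (pvFlt_perm vocab)
    exact ((((((PySem.List.sorted_perm _ _ false).append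
      (PySem.List.sorted_perm _ _ false)).append
      (PySem.List.sorted_perm _ _ false)).append
      (PySem.List.sorted_perm _ _ false)).append
      (PySem.List.sorted_perm _ _ false)).append
      (PySem.List.sorted_perm _ _ false))
  exact PySem.List.eq_of_perm_of_pairwise_le_of_injective pvKey pvKey_inj hC
    (pvConcat_pw vocab) (PySem.List.sorted_pairwise vocab pvKey)
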